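-- pv_equiv track=rewrite | github.com/abhindeves/Quiz-Generator | teacher.py | create_student_view
-- ===== SOURCE A (Python) =====
-- def create_student_view(test,num_question):
--     questions = {1:''}
--     question_number = 1
--     question_block = test.split("\n")
--     question_block = [block.strip() for block in question_block]
--     for block in question_block:
--         if not block.startswith("Answer: "):
--             questions[question_number] += block+'\n'
--         else:
--             if question_number < num_question:
--                 question_number += 1
--                 questions[question_number] = ''
--     return questions
-- ===== SOURCE B (Python) =====
-- def create_student_view(test, num_question):
--     lines = [line.strip() for line in test.split("\n")]
--     answer_positions = [i for i, line in enumerate(lines) if line.startswith("Answer: ")]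
--     boundaries = answer_positions[:max(num_question - 1, 0)]
--     segments = []
--     start = 0
--     for b in boundaries:
--         segments.append("".join(line + "\n" for line in lines[start:b]))
--         start = b + 1
--     segments.append("".join(line + "\n" for line in lines[start:]
--                             if not line.startswith("Answer: ")))
--     return {k: seg for k, seg in enumerate(segments, 1)}
-- ===== Notes on version B (the rewrite author's own statement) =====
-- stated objective: alternative
-- what changed: Replaces A's single accumulating pass (a dict entry mutated in place under a capped question counter) with a boundary-index decomposition: collect the indices of 'Answer: ' lines, keep the first num_question-1 as segment boundaries, and assemble each question from its slice of lines, the final question absorbing the remaining non-answer lines.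
import Mathlib
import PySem

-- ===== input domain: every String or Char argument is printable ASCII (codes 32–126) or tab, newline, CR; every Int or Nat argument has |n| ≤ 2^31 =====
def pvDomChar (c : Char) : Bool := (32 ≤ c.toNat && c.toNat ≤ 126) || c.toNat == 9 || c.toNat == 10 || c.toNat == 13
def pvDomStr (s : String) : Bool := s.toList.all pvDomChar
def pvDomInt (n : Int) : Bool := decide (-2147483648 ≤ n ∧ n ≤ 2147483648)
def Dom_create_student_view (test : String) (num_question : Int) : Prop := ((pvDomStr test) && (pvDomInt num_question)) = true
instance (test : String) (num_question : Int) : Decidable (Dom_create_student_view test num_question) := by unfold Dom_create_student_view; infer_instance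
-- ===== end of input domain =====

-- B replaces A's single accumulating pass (a dict entry mutated under a capped question
-- counter) by a boundary-index decomposition: collect the indices of 'Answer: ' lines,
-- keep the first num_question-1 as segment boundaries, and assemble each question from
-- its slice of lines; objective: alternative.

-- ===== PORT A =====
def pvIsAns (l : String) : Bool := PySem.Str.startswith l "Answer: "

def pvStepA (nq : Int) (st : PySem.Dict Int String × Int) (block : String) :
    PySem.Dict Int String × Int :=
  if ¬ pvIsAns block then
    -- questions[question_number] += block+'\n' : the key is always present, so
    -- get-then-set is exactly insert with getD's default never used
    (st.1.insert st.2 (st.1.getD st.2 "" ++ (block ++ "\n")), st.2)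
  else
    if st.2 < nq then (st.1.insert (st.2 + 1) "", st.2 + 1) else st

def create_student_view (test : String) (num_question : Int) : List (Int × String) :=
  let questions : PySem.Dict Int String := PySem.Dict.empty.insert 1 ""
  let question_block := (PySem.Str.split? test "\n").getD []   -- sep ≠ "", never none
  let question_block := question_block.map PySem.Str.strip
  ((question_block.foldl (pvStepA num_question) (questions, 1)).1).items

-- ===== PORT B =====
def pvStepB (lines : List String) (st : List String × Int) (b : Int) : List String × Int :=
  (st.1 ++ [PySem.Str.join "" ((PySem.List.slice lines (some st.2) (some b)).map (· ++ "\n"))],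
   b + 1)

def create_student_view_alt (test : String) (num_question : Int) : List (Int × String) :=
  let lines := ((PySem.Str.split? test "\n").getD []).map PySem.Str.strip
  let answer_positions :=
    (PySem.List.enumerate lines 0).filterMap (fun p => if pvIsAns p.2 then some p.1 else none)
  let boundaries := PySem.List.slice answer_positions none (some (max (num_question - 1) 0))
  let st := boundaries.foldl (pvStepB lines) ([], 0)
  let segments := st.1 ++
    [PySem.Str.join ""
      (((PySem.List.slice lines (some st.2) none).filter (fun l => !pvIsAns l)).map (· ++ "\n"))]
  -- dict comprehension over enumerate(segments, 1): keys are distinct, so its items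
  -- are exactly the enumerate list
  PySem.List.enumerate segments 1

-- ===== PRECONDITION & SPEC =====
def Spec_create_student_view (test : String) (num_question : Int) (out : List (Int × String)) : Prop := out = create_student_view_alt test num_question
instance (test : String) (num_question : Int) (out : List (Int × String)) : Decidable (Spec_create_student_view test num_question out) := by unfold Spec_create_student_view; infer_instance

-- ===== CLAIM (what is proved, stated in full; the proofs are below) =====
def Claim_equal_create_student_view : Prop := ∀ (test : String) (num_question : Int), Dom_create_student_view test num_question → Spec_create_student_view test num_question (create_student_view test num_question)

-- ===== LEMMAS AND PROOFS =====

-- segment-list skeleton shared by both proofs: forward recursion with an 'allowed opens' budget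
def pvAddFirst (p : String) : List String → List String
  | [] => [p]
  | s :: ss => (p ++ s) :: ss

def pvFseg : List String → Int → List String
  | [], _ => [""]
  | l :: rest, a =>
    if pvIsAns l then (if 0 < a then "" :: pvFseg rest (a - 1) else pvFseg rest a)
    else pvAddFirst (l ++ "\n") (pvFseg rest a)

lemma pvAddFirst_ne_nil (p : String) (L : List String) : pvAddFirst p L ≠ [] := by
  cases L <;> simp [pvAddFirst]

lemma pvFseg_ne_nil (L : List String) (a : Int) : pvFseg L a ≠ [] := by
  induction L generalizing a with
  | nil => simp [pvFseg]
  | cons l rest ih =>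
    simp only [pvFseg]
    split
    · split
      · simp
      · exact ih a
    · exact pvAddFirst_ne_nil _ _

lemma pvAddFirst_empty (L : List String) (h : L ≠ []) : pvAddFirst "" L = L := by
  cases L with
  | nil => exact absurd rfl h
  | cons s ss => simp [pvAddFirst]

lemma pvAddFirst_addFirst (p q : String) (L : List String) :
    pvAddFirst p (pvAddFirst q L) = pvAddFirst (p ++ q) L := by
  cases L <;> simp [pvAddFirst, String.append_assoc]

lemma pvFseg_nonpos (L : List String) (a b : Int) (ha : a ≤ 0) (hb : b ≤ 0) :
    pvFseg L a = pvFseg L b := by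
  induction L generalizing a b with
  | nil => simp [pvFseg]
  | cons l rest ih =>
    simp only [pvFseg]
    split
    · rw [if_neg (by omega), if_neg (by omega)]
      exact ih a b ha hb
    · rw [ih a b ha hb]

-- ===== B side =====

-- the (absolute) answer positions, as B's enumerate-comprehension computes them
def pvAps : List String → Int → List Int
  | [], _ => []
  | l :: rest, s => if pvIsAns l then s :: pvAps rest (s + 1) else pvAps rest (s + 1)

-- '"".join(line + "\n" for line in L)'
def pvCat (L : List String) : String := PySem.Str.join "" (L.map (· ++ "\n"))

-- B's segment assembly from the first m boundaries
def pvSegsOf (L : List String) (m : Nat) : List String :=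
  let st := ((pvAps L 0).take m).foldl (pvStepB L) ([], 0)
  st.1 ++ [pvCat ((PySem.List.slice L (some st.2) none).filter (fun l => !pvIsAns l))]

lemma pvAps_eq (L : List String) (s : Int) :
    (PySem.List.enumerate L s).filterMap (fun p => if pvIsAns p.2 then some p.1 else none)
      = pvAps L s := by
  induction L generalizing s with
  | nil => simp [pvAps]
  | cons l rest ih =>
    rw [PySem.List.enumerate_cons, List.filterMap_cons]
    by_cases h : pvIsAns l <;> simp [pvAps, h, ih]

lemma pvAps_shift (L : List String) (s : Int) :
    pvAps L (s + 1) = (pvAps L s).map (· + 1) := by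
  induction L generalizing s with
  | nil => simp [pvAps]
  | cons l rest ih =>
    by_cases h : pvIsAns l <;> simp [pvAps, h, ih]

lemma pvAps_nonneg (L : List String) (s b : Int) (hs : 0 ≤ s) (hb : b ∈ pvAps L s) : 0 ≤ b := by
  induction L generalizing s with
  | nil => simp [pvAps] at hb
  | cons l rest ih =>
    by_cases h : pvIsAns l
    · simp only [pvAps, h, if_true, List.mem_cons] at hb
      rcases hb with rfl | hb
      · exact hs
      · exact ih (s + 1) (by omega) hb
    · simp only [pvAps, h] at hb
      exact ih (s + 1) (by omega) hb

lemma pvCat_nil : pvCat [] = "" := by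
  simp [pvCat, PySem.Str.join, PySem.Chars.join, List.intercalate]

lemma pvCat_cons (l : String) (L : List String) :
    pvCat (l :: L) = (l ++ "\n") ++ pvCat L := by
  have hnl : String.ofList ['\n'] = "\n" := rfl
  simp only [pvCat, List.map_cons]
  simp [PySem.Str.join, PySem.Chars.join, List.intercalate]
  cases L with
  | nil => simp
  | cons y t =>
    rw [show List.map (String.toList ∘ fun x => x ++ "\n") (y :: t)
        = (y.toList ++ ['\n']) :: List.map (String.toList ∘ fun x => x ++ "\n") t from by simp]
    rw [show (List.intersperse ([] : List Char)
          ((l.toList ++ ['\n']) :: (y.toList ++ ['\n']) :: List.map (String.toList ∘ fun x => x ++ "\n") t)).flatten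
        = (l.toList ++ ['\n']) ++ (List.intersperse []
            ((y.toList ++ ['\n']) :: List.map (String.toList ∘ fun x => x ++ "\n") t)).flatten from by
      simp [List.intersperse]]
    rw [String.ofList_append, String.ofList_append, hnl, String.ofList_toList,
        String.append_assoc]

-- the foldl appends to the accumulator, so the accumulator factors out
lemma pvFold_acc (L : List String) (bs : List Int) :
    ∀ (acc : List String) (s : Int),
    bs.foldl (pvStepB L) (acc, s)
      = (acc ++ (bs.foldl (pvStepB L) ([], s)).1, (bs.foldl (pvStepB L) ([], s)).2) := by
  induction bs with
  | nil => intro acc s; simp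
  | cons b bs ih =>
    intro acc s
    simp only [List.foldl_cons, pvStepB, List.nil_append]
    rw [ih (acc ++ [PySem.Str.join "" ((PySem.List.slice L (some s) (some b)).map (· ++ "\n"))]) (b + 1),
        ih [PySem.Str.join "" ((PySem.List.slice L (some s) (some b)).map (· ++ "\n"))] (b + 1)]
    simp

lemma pvFold_snd_nonneg (L : List String) (bs : List Int) :
    ∀ (s : Int), 0 ≤ s → (∀ b ∈ bs, 0 ≤ b) →
    0 ≤ (bs.foldl (pvStepB L) ([], s)).2 := by
  induction bs with
  | nil => intro s hs _; simpa using hs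
  | cons b bs ih =>
    intro s hs hb
    rw [List.foldl_cons]
    rw [pvFold_acc]
    exact ih (b + 1) (by have := hb b (by simp); omega) (fun x hx => hb x (by simp [hx]))

lemma pvSlice_shift (l : String) (rest : List String) (s b : Int) (hs : 0 ≤ s) (hb : 0 ≤ b) :
    PySem.List.slice (l :: rest) (some (s + 1)) (some (b + 1))
      = PySem.List.slice rest (some s) (some b) := by
  rw [PySem.List.slice_toNat _ (by omega) (by omega),
      PySem.List.slice_toNat _ hs hb]
  have h1 : (s + 1).toNat = s.toNat + 1 := by omega
  have h2 : (b + 1).toNat = b.toNat + 1 := by omega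
  rw [h1, h2]
  simp

lemma pvSliceFrom_shift (l : String) (rest : List String) (s : Int) (hs : 0 ≤ s) :
    PySem.List.slice (l :: rest) (some (s + 1)) none = PySem.List.slice rest (some s) none := by
  rw [PySem.List.slice_from _ (by omega), PySem.List.slice_from _ hs]
  have h1 : (s + 1).toNat = s.toNat + 1 := by omega
  rw [h1]
  simp

-- shifting every boundary and the start by one steps over a prepended line
lemma pvFold_shift (l : String) (rest : List String) (bs : List Int) :
    ∀ (s : Int), 0 ≤ s → (∀ b ∈ bs, 0 ≤ b) →
    (bs.map (· + 1)).foldl (pvStepB (l :: rest)) ([], s + 1)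
      = ((bs.foldl (pvStepB rest) ([], s)).1, (bs.foldl (pvStepB rest) ([], s)).2 + 1) := by
  induction bs with
  | nil => intro s _ _; simp
  | cons b bs ih =>
    intro s hs hb
    have hb0 : 0 ≤ b := hb b (by simp)
    rw [List.map_cons, List.foldl_cons, List.foldl_cons]
    show (bs.map (· + 1)).foldl (pvStepB (l :: rest))
        ([] ++ [PySem.Str.join "" ((PySem.List.slice (l :: rest) (some (s + 1)) (some (b + 1))).map (· ++ "\n"))], b + 1 + 1) = _
    rw [pvSlice_shift l rest s b hs hb0]
    rw [pvFold_acc (l :: rest) _ _ (b + 1 + 1)]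
    rw [ih (b + 1) (by omega) (fun x hx => hb x (by simp [hx]))]
    rw [show pvStepB rest ([], s) b
        = ([PySem.Str.join "" ((PySem.List.slice rest (some s) (some b)).map (· ++ "\n"))], b + 1) from rfl]
    rw [pvFold_acc rest bs [PySem.Str.join "" ((PySem.List.slice rest (some s) (some b)).map (· ++ "\n"))] (b + 1)]
    simp

lemma pvSegsOf_eq (L : List String) (m : Nat) : pvSegsOf L m = pvFseg L (m : Int) := by
  induction L generalizing m with
  | nil =>
    simp [pvSegsOf, pvAps, pvFseg, pvCat_nil, PySem.List.slice_from _ (le_rfl : (0:Int) ≤ 0)]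
  | cons l rest ih =>
    have h0 : PySem.List.slice (l :: rest) (some (0:Int)) none = l :: rest := by
      rw [PySem.List.slice_from _ le_rfl]; simp
    have h0' : PySem.List.slice rest (some (0:Int)) none = rest := by
      rw [PySem.List.slice_from _ le_rfl]; simp
    have hsh : pvAps rest 1 = (pvAps rest 0).map (· + 1) := by
      simpa using pvAps_shift rest 0
    by_cases h : pvIsAns l
    · cases m with
      | zero =>
        have ih0 : pvSegsOf rest 0 = pvFseg rest 0 := by simpa using ih 0
        simp only [pvSegsOf, pvAps, h, if_true, List.take_zero, List.foldl_nil,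
          Nat.cast_zero, pvFseg]
        rw [if_neg (by omega), ← ih0]
        simp only [pvSegsOf, List.take_zero, List.foldl_nil]
        rw [h0, h0', List.filter_cons_of_neg (by simp [h])]
      | succ m' =>
        simp only [pvSegsOf, pvAps, h, if_true, zero_add, List.take_succ_cons,
          List.foldl_cons, hsh, ← List.map_take]
        have hstep : pvStepB (l :: rest) ([], 0) 0 = ([""], 1) := by
          simp only [pvStepB, List.nil_append, zero_add]
          rw [PySem.List.slice_toNat _ (le_rfl : (0:Int) ≤ 0) (le_rfl : (0:Int) ≤ 0)]
          simp [PySem.Str.join, PySem.Chars.join, List.intercalate]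
        rw [hstep]
        have hnn : ∀ b ∈ (pvAps rest 0).take m', 0 ≤ b :=
          fun b hbm => pvAps_nonneg rest 0 b le_rfl (List.mem_of_mem_take hbm)
        rw [pvFold_acc (l :: rest) _ [""] 1]
        have hshift := pvFold_shift l rest ((pvAps rest 0).take m') 0 le_rfl hnn
        simp only [zero_add] at hshift
        rw [hshift]
        have hfin : 0 ≤ (((pvAps rest 0).take m').foldl (pvStepB rest) ([], 0)).2 :=
          pvFold_snd_nonneg rest _ 0 le_rfl hnn
        rw [pvSliceFrom_shift l rest _ hfin]
        have hrhs : pvFseg (l :: rest) ((m' + 1 : Nat) : Int)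
            = "" :: pvFseg rest (m' : Int) := by
          simp only [pvFseg, h, if_true]
          rw [if_pos (by push_cast; omega)]
          congr 1
          congr 1
          push_cast; ring
        rw [hrhs, ← ih m']
        unfold pvSegsOf
        simp
    · simp only [pvSegsOf, pvAps, h, Bool.false_eq_true, if_false, zero_add, hsh, ← List.map_take]
      have hnn : ∀ b ∈ (pvAps rest 0).take m, 0 ≤ b :=
        fun b hbm => pvAps_nonneg rest 0 b le_rfl (List.mem_of_mem_take hbm)
      have hrhs : pvFseg (l :: rest) (m : Int) = pvAddFirst (l ++ "\n") (pvFseg rest (m : Int)) := by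
        simp [pvFseg, h]
      rw [hrhs, ← ih m]
      cases hbs : (pvAps rest 0).take m with
      | nil =>
        simp only [List.map_nil, List.foldl_nil]
        rw [h0, List.filter_cons_of_pos (by simp [h]), pvCat_cons]
        unfold pvSegsOf
        simp [hbs, h0', pvAddFirst]
      | cons b bs =>
        have hb0 : 0 ≤ b := hnn b (by simp [hbs])
        have hbsnn : ∀ x ∈ bs, 0 ≤ x := fun x hx => hnn x (by simp [hbs, hx])
        simp only [List.map_cons, List.foldl_cons]
        have hsl : PySem.List.slice (l :: rest) (some (0:Int)) (some (b + 1))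
            = l :: PySem.List.slice rest (some (0:Int)) (some b) := by
          rw [PySem.List.slice_toNat _ (le_rfl : (0:Int) ≤ 0) (by omega : (0:Int) ≤ b + 1),
              PySem.List.slice_toNat _ (le_rfl : (0:Int) ≤ 0) hb0]
          have h2 : (b + 1).toNat = b.toNat + 1 := by omega
          rw [h2]
          simp
        have hstep : pvStepB (l :: rest) ([], 0) (b + 1)
            = ([(l ++ "\n") ++ pvCat (PySem.List.slice rest (some (0:Int)) (some b))], b + 1 + 1) := by
          simp only [pvStepB, List.nil_append]
          rw [hsl]
          rw [show PySem.Str.join "" ((l :: PySem.List.slice rest (some (0:Int)) (some b)).map (· ++ "\n"))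
              = pvCat (l :: PySem.List.slice rest (some (0:Int)) (some b)) from rfl, pvCat_cons]
        rw [hstep]
        rw [pvFold_acc (l :: rest) _ _ (b + 1 + 1)]
        have hshift := pvFold_shift l rest bs (b + 1) (by omega) hbsnn
        rw [hshift]
        have hfin : 0 ≤ (bs.foldl (pvStepB rest) ([], b + 1)).2 :=
          pvFold_snd_nonneg rest bs (b + 1) (by omega) hbsnn
        rw [pvSliceFrom_shift l rest _ hfin]
        -- rest side
        unfold pvSegsOf
        simp only [hbs, List.foldl_cons]
        have hstepR : pvStepB rest ([], 0) b
            = ([pvCat (PySem.List.slice rest (some (0:Int)) (some b))], b + 1) := rfl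
        rw [hstepR]
        rw [pvFold_acc rest bs [pvCat (PySem.List.slice rest (some (0:Int)) (some b))] (b + 1)]
        simp [pvAddFirst, String.append_assoc]

-- the cap max(num_question-1, 0): clamping the budget below zero never changes pvFseg
lemma pvFseg_clamp (L : List String) (nq : Int) :
    pvFseg L (((max (nq - 1) 0).toNat : Nat) : Int) = pvFseg L (nq - 1) := by
  by_cases hpos : 0 ≤ nq - 1
  · have : (((max (nq - 1) 0).toNat : Nat) : Int) = nq - 1 := by omega
    rw [this]
  · have : (((max (nq - 1) 0).toNat : Nat) : Int) = 0 := by omega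
    rw [this]
    exact pvFseg_nonpos L 0 (nq - 1) le_rfl (by omega)

-- ===== A side =====
lemma pvGetD_last (pre : List (Int × String)) (qn : Int) (cur d0 : String)
    (h : ∀ p ∈ pre, p.1 ≠ qn) :
    (PySem.Dict.mk (pre ++ [(qn, cur)])).getD qn d0 = cur := by
  induction pre with
  | nil => simp [PySem.Dict.getD_eq_get?_getD, PySem.Dict.get?_mk_cons]
  | cons p ps ih =>
    have hp : p.1 ≠ qn := h p (by simp)
    rw [List.cons_append, PySem.Dict.getD_eq_get?_getD, PySem.Dict.get?_mk_cons,
        if_neg (by simp [hp]), ← PySem.Dict.getD_eq_get?_getD]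
    exact ih (fun q hq => h q (by simp [hq]))

lemma pvContains_last (pre : List (Int × String)) (qn : Int) (cur : String) :
    (PySem.Dict.mk (pre ++ [(qn, cur)])).contains qn = true := by
  simp [PySem.Dict.contains_mk]

lemma pvInsert_last (pre : List (Int × String)) (qn : Int) (cur v : String)
    (h : ∀ p ∈ pre, p.1 ≠ qn) :
    (PySem.Dict.mk (pre ++ [(qn, cur)])).insert qn v = PySem.Dict.mk (pre ++ [(qn, v)]) := by
  apply PySem.Dict.ext
  rw [PySem.Dict.items_insert_of_contains _ _ (pvContains_last pre qn cur)]
  have hitems : (PySem.Dict.mk (pre ++ [(qn, cur)])).items = pre ++ [(qn, cur)] := rfl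
  rw [hitems, List.map_append]
  congr 1
  · calc List.map (fun p => if (p.1 == qn) = true then (qn, v) else p) pre
        = List.map id pre := List.map_congr_left (fun p hp => by simp [h p hp])
      _ = pre := List.map_id pre
  · simp

lemma pvInsert_fresh (ps : List (Int × String)) (k : Int) (v : String)
    (h : ∀ p ∈ ps, p.1 ≠ k) :
    (PySem.Dict.mk ps).insert k v = PySem.Dict.mk (ps ++ [(k, v)]) := by
  apply PySem.Dict.ext
  rw [PySem.Dict.items_insert_of_not_contains]
  simp only [PySem.Dict.contains_mk, List.any_eq_false]
  intro p hp
  simp [h p hp]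

-- A side: the forward dict fold computes pre ++ enumerate of pvFseg
lemma pvAfold (nq : Int) (L : List String) :
    ∀ (pre : List (Int × String)) (qn : Int) (cur : String),
    (∀ p ∈ pre, p.1 < qn) →
    ((L.foldl (pvStepA nq) (PySem.Dict.mk (pre ++ [(qn, cur)]), qn)).1).items
      = pre ++ PySem.List.enumerate (pvAddFirst cur (pvFseg L (nq - qn))) qn := by
  induction L with
  | nil => intro pre qn cur _; simp [pvFseg, pvAddFirst, PySem.List.enumerate]
  | cons l rest ih =>
    intro pre qn cur hk
    have hne : ∀ p ∈ pre, p.1 ≠ qn := fun p hp => by have := hk p hp; omega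
    by_cases h : pvIsAns l
    · by_cases hlt : qn < nq
      · rw [List.foldl_cons]
        have hstep : pvStepA nq (PySem.Dict.mk (pre ++ [(qn, cur)]), qn) l
            = (PySem.Dict.mk ((pre ++ [(qn, cur)]) ++ [(qn + 1, "")]), qn + 1) := by
          simp only [pvStepA, h, not_true, if_false, if_pos hlt]
          rw [pvInsert_fresh]
          intro p hp
          rcases List.mem_append.1 hp with hp | hp
          · have := hk p hp; omega
          · obtain rfl := List.mem_singleton.1 hp; simp
        rw [hstep, ih ((pre ++ [(qn, cur)])) (qn + 1) ""
              (by intro p hp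
                  rcases List.mem_append.1 hp with hp | hp
                  · have := hk p hp; omega
                  · obtain rfl := List.mem_singleton.1 hp; simp)]
        have ha : (0:Int) < nq - qn := by omega
        simp only [pvFseg, h, if_true, if_pos ha]
        rcases hfs : pvFseg rest (nq - qn - 1) with _ | ⟨s, ss⟩
        · exact absurd hfs (pvFseg_ne_nil _ _)
        · have : nq - (qn + 1) = nq - qn - 1 := by ring
          rw [this, hfs]
          simp [pvAddFirst, PySem.List.enumerate_cons]
      · rw [List.foldl_cons]
        have hstep : pvStepA nq (PySem.Dict.mk (pre ++ [(qn, cur)]), qn)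
            l = (PySem.Dict.mk (pre ++ [(qn, cur)]), qn) := by
          simp [pvStepA, h, hlt]
        rw [hstep, ih pre qn cur hk]
        simp only [pvFseg, h, if_true, if_neg (show ¬ (0:Int) < nq - qn by omega)]
    · rw [List.foldl_cons]
      have hstep : pvStepA nq (PySem.Dict.mk (pre ++ [(qn, cur)]), qn) l
          = (PySem.Dict.mk (pre ++ [(qn, cur ++ (l ++ "\n"))]), qn) := by
        simp only [pvStepA]
        rw [if_pos (by simp [h]), pvGetD_last pre qn cur "" hne,
            pvInsert_last pre qn cur _ hne]
      rw [hstep, ih pre qn (cur ++ (l ++ "\n")) hk]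
      simp only [pvFseg, h, Bool.false_eq_true, if_false, pvAddFirst_addFirst]

-- ===== VERDICT (by name: the statement is the Claim_ definition above) =====
theorem create_student_view_spec : Claim_equal_create_student_view := by
  unfold Claim_equal_create_student_view Spec_create_student_view
  intro test nq _
  show create_student_view test nq = create_student_view_alt test nq
  unfold create_student_view create_student_view_alt
  simp only []
  generalize ((PySem.Str.split? test "\n").getD []).map PySem.Str.strip = lines
  -- A side: items of the dict fold are enumerate of pvFseg
  have hinit : ((PySem.Dict.empty : PySem.Dict Int String).insert 1 "") =
      PySem.Dict.mk (([] : List (Int × String)) ++ [(1, "")]) := rfl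
  rw [hinit, pvAfold nq lines [] 1 "" (by intro p hp; simp at hp)]
  rw [pvAddFirst_empty _ (pvFseg_ne_nil _ _)]
  -- B side: boundaries-and-slices assembly is pvSegsOf
  rw [pvAps_eq lines 0,
      PySem.List.slice_to _ (by omega : (0:Int) ≤ max (nq - 1) 0)]
  have hB : (((pvAps lines 0).take (max (nq - 1) 0).toNat).foldl (pvStepB lines) ([], 0)).1 ++
      [PySem.Str.join ""
        (((PySem.List.slice lines
            (some (((pvAps lines 0).take (max (nq - 1) 0).toNat).foldl (pvStepB lines) ([], 0)).2)
            none).filter (fun l => !pvIsAns l)).map (· ++ "\n"))]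
      = pvSegsOf lines (max (nq - 1) 0).toNat := rfl
  rw [hB, pvSegsOf_eq, pvFseg_clamp]
  simp
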